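-- pv_equiv track=rewrite | github.com/lerrigatto/algo2 | src/es07-bt/es0703.py | specular
-- ===== SOURCE A (Python) =====
-- def specular(T):
--     l = len(T)*2
--     S = [None] * l
--     for i,v in enumerate(T):
--         S[i] = v
--         j = l-i-1
--         S[j] = v
--     return S
-- ===== SOURCE B (Python) =====
-- def specular(T):
--     S = list(T)
--     S.extend(reversed(T))
--     return S
-- ===== Notes on version B (the rewrite author's own statement) =====
-- stated objective: idiomatic
-- what changed: B builds the result as two sequential bulk passes (copy T, then append reversed(T)) instead of A's single Python-level loop writing each element into both ends of a preallocated placeholder array.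
import Mathlib
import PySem

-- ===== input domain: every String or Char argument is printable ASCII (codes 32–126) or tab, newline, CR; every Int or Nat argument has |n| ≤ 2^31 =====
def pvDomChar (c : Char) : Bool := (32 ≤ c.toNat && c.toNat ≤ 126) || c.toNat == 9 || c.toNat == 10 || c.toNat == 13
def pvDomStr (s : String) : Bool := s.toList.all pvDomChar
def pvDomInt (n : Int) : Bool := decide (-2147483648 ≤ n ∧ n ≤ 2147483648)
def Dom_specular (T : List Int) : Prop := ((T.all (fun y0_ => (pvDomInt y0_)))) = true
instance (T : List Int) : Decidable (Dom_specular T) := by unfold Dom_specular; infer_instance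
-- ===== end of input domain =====

-- B replaces A's single loop writing into both ends of a preallocated array by two passes: copy T, then append reversed T (idiomatic; return value only).

-- ===== PORT A =====
-- S = [None] * l : placeholder list; the placeholder (here 0) is never observable since every
-- slot is overwritten; pySetD is exact for the in-range assignments A performs.
def specular (T : List Int) : List Int :=
  let l : Int := (T.length : Int) * 2
  let S : List Int := List.replicate l.toNat 0
  (PySem.List.enumerate T 0).foldl
    (fun S p =>
      let S1 := PySem.List.pySetD S p.1 p.2
      let j := l - p.1 - 1
      PySem.List.pySetD S1 j p.2) S

-- ===== PORT B =====
def specular_alt (T : List Int) : List Int :=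
  let S := T
  S ++ T.reverse

-- ===== PRECONDITION & SPEC =====
def Spec_specular (T : List Int) (out : List Int) : Prop := out = specular_alt T
instance (T : List Int) (out : List Int) : Decidable (Spec_specular T out) := by unfold Spec_specular; infer_instance

-- ===== CLAIM (what is proved, stated in full; the proofs are below) =====
def Claim_equal_specular : Prop := ∀ (T : List Int), Dom_specular T → Spec_specular T (specular T)

-- ===== LEMMAS AND PROOFS =====

theorem set_append_len_add {α : Type} (P X : List α) (k : Nat) (v : α) :
    (P ++ X).set (P.length + k) v = P ++ X.set k v := by
  induction P with
  | nil => simp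
  | cons a P ih => simp [Nat.succ_add, ih]

-- loop invariant: with k elements already mirrored into both ends, the state is
-- P ++ zeros ++ Q and folding the remaining enumerate fills the middle symmetrically.
theorem specular_loop (rest : List Int) : ∀ (k : Nat) (P Q : List Int),
    P.length = k → Q.length = k →
    (PySem.List.enumerate rest (k : Int)).foldl
      (fun S p =>
        let S1 := PySem.List.pySetD S p.1 p.2
        let j := ((2 * (k + rest.length) : Nat) : Int) - p.1 - 1
        PySem.List.pySetD S1 j p.2)
      (P ++ (List.replicate (2 * rest.length) 0 ++ Q))
    = P ++ (rest ++ (rest.reverse ++ Q)) := by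
  induction rest with
  | nil => intro k P Q hP hQ; simp [PySem.List.enumerate_nil]
  | cons v rest ih =>
    intro k P Q hP hQ
    rw [PySem.List.enumerate_cons]
    simp only [List.foldl_cons]
    have h2 : 2 * (v :: rest).length = (2 * rest.length + 1) + 1 := by simp; omega
    have hmid : List.replicate (2 * (v :: rest).length) (0:Int) ++ Q
        = 0 :: (List.replicate (2 * rest.length) (0:Int) ++ (0 :: Q)) := by
      rw [h2, List.replicate_succ, List.replicate_add]
      simp
    -- first assignment: index k = P.length
    have hset1 : PySem.List.pySetD (P ++ (List.replicate (2 * (v :: rest).length) 0 ++ Q)) (k : Int) v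
        = P ++ (v :: (List.replicate (2 * rest.length) (0:Int) ++ (0 :: Q))) := by
      rw [PySem.List.pySetD_natCast, hmid, ← hP]
      have := set_append_len_add P (0 :: (List.replicate (2 * rest.length) (0:Int) ++ (0 :: Q))) 0 v
      simp only [Nat.add_zero] at this
      rw [this]
      simp
    -- second assignment: index 2*(k + (rest.length+1)) - k - 1 = k + (2*rest.length + 1)
    have hidx : ((2 * (k + (v :: rest).length) : Nat) : Int) - (k : Int) - 1
        = ((k + (2 * rest.length + 1) : Nat) : Int) := by
      simp only [List.length_cons]; push_cast; ring
    have hset2 : PySem.List.pySetD (P ++ (v :: (List.replicate (2 * rest.length) (0:Int) ++ (0 :: Q))))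
          (((k + (2 * rest.length + 1) : Nat) : Int)) v
        = (P ++ [v]) ++ (List.replicate (2 * rest.length) (0:Int) ++ (v :: Q)) := by
      rw [PySem.List.pySetD_natCast]
      have hlen : k + (2 * rest.length + 1) = (P ++ [v]).length + (2 * rest.length + 0) := by
        simp [hP]; omega
      have h3 : P ++ (v :: (List.replicate (2 * rest.length) (0:Int) ++ (0 :: Q)))
          = (P ++ [v]) ++ ((List.replicate (2 * rest.length) (0:Int) ++ [0]) ++ Q) := by simp
      rw [h3, hlen, set_append_len_add]
      congr 1
      have := set_append_len_add (List.replicate (2 * rest.length) (0:Int)) (0 :: Q) 0 v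
      simp only [List.length_replicate, Nat.add_zero] at this
      simp only [Nat.add_zero, List.append_assoc, List.singleton_append]
      rw [this]
      simp
    simp only [hset1, hidx, hset2]
    have hrec := ih (k + 1) (P ++ [v]) (v :: Q) (by simp [hP]) (by simp [hQ])
    have hcast : ((k : Int) + 1) = ((k + 1 : Nat) : Int) := by push_cast; ring
    have hl : 2 * ((k + 1) + rest.length) = 2 * (k + (v :: rest).length) := by simp; omega
    rw [hcast]
    simp only [hl] at hrec
    rw [hrec]
    simp

-- ===== VERDICT (by name: the statement is the Claim_ definition above) =====
theorem specular_spec : Claim_equal_specular := by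
  intro T _
  unfold Spec_specular specular specular_alt
  have h := specular_loop T 0 [] [] rfl rfl
  simp only [List.nil_append, List.append_nil] at h ⊢
  have hlen : ((T.length : Int) * 2).toNat = 2 * T.length := by omega
  simpa [hlen, Nat.zero_add, mul_comm] using h
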